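-- pv_equiv track=rewrite | github.com/Basssu/manaoke-get-lyric | setVideo/UpdateAllSeries.py | updatedSeriesIdList
-- ===== SOURCE A (Python) =====
-- def updatedSeriesIdList(videoIds: list[str], updatedVideosDict: dict[str, list[str]]) -> list[str]:
--     seriesIds = []
--     for videoId in videoIds:
--         for key, value in updatedVideosDict.items():
--             if videoId in value:
--                 seriesIds.append(key)
--                 break
--     return (set(seriesIds))
-- ===== SOURCE B (Python) =====
-- def updatedSeriesIdList(videoIds: list[str], updatedVideosDict: dict[str, list[str]]) -> list[str]:
--     # Build inverse index once: video -> first dict key whose value list contains it.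
--     index = {}
--     for key, values in updatedVideosDict.items():
--         for v in values:
--             if v not in index:
--                 index[v] = key
--     return set(index[v] for v in videoIds if v in index)
-- ===== Notes on version B (the rewrite author's own statement) =====
-- stated objective: faster
-- what changed: Replaces the per-videoId linear scan over all dict items (with an inner membership test on each value list) by a single pass that builds an inverse video->first-key index, then answers each videoId by one dict lookup.
import Mathlib
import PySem

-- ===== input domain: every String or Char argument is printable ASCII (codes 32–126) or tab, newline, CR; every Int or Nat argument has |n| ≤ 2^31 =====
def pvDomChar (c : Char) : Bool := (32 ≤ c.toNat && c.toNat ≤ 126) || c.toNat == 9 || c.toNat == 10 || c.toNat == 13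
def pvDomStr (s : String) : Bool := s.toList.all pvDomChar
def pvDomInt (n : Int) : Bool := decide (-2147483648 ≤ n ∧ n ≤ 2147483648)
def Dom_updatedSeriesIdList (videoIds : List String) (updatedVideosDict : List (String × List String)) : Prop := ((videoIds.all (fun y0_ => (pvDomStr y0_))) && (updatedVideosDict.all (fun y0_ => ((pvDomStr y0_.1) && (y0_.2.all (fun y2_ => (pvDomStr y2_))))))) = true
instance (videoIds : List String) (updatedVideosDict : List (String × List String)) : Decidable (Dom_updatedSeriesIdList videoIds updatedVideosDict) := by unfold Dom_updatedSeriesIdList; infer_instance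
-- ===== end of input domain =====

-- B builds an inverse video->first-key index in one pass, then looks each videoId up (faster); the result is a Python set either way.

-- ===== PORT A =====
-- the inner 'for key, value in updatedVideosDict.items(): if videoId in value: append(key); break'
def pvFindKeyA (videoId : String) : List (String × List String) → Option String
  | [] => none
  | (k, v) :: rest => if v.contains videoId then some k else pvFindKeyA videoId rest

def updatedSeriesIdList (videoIds : List String) (updatedVideosDict : List (String × List String)) : List String :=
  PySem.Set.ofList
    (videoIds.foldl
      (fun seriesIds videoId =>
        match pvFindKeyA videoId updatedVideosDict with
        | some k => seriesIds ++ [k]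
        | none => seriesIds)
      [])

-- ===== PORT B =====
-- B's first pass: index[v] = key for the first key whose values contain v
def pvBuildIndex (items : List (String × List String)) : PySem.Dict String String :=
  items.foldl
    (fun d kv => kv.2.foldl (fun d v => if d.contains v then d else d.insert v kv.1) d)
    PySem.Dict.empty

def updatedSeriesIdList_alt (videoIds : List String) (updatedVideosDict : List (String × List String)) : List String :=
  PySem.Set.ofList (videoIds.filterMap (fun v => (pvBuildIndex updatedVideosDict).get? v))

-- ===== PRECONDITION & SPEC =====
def Spec_updatedSeriesIdList (videoIds : List String) (updatedVideosDict : List (String × List String)) (out : List String) : Prop := out = updatedSeriesIdList_alt videoIds updatedVideosDict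
instance (videoIds : List String) (updatedVideosDict : List (String × List String)) (out : List String) : Decidable (Spec_updatedSeriesIdList videoIds updatedVideosDict out) := by unfold Spec_updatedSeriesIdList; infer_instance

-- ===== CLAIM (what is proved, stated in full; the proofs are below) =====
def Claim_equal_updatedSeriesIdList : Prop := ∀ (videoIds : List String) (updatedVideosDict : List (String × List String)), Dom_updatedSeriesIdList videoIds updatedVideosDict → Spec_updatedSeriesIdList videoIds updatedVideosDict (updatedSeriesIdList videoIds updatedVideosDict)

-- ===== LEMMAS AND PROOFS =====

-- the inner value-loop of pvBuildIndex: lookup after folding one value list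
theorem pv_inner_get? (vals : List String) (d : PySem.Dict String String) (k x : String) :
    (vals.foldl (fun d v => if d.contains v then d else d.insert v k) d).get? x =
      match d.get? x with
      | some w => some w
      | none => if vals.contains x then some k else none := by
  induction vals generalizing d with
  | nil => cases h : d.get? x <;> simp [h]
  | cons v vs ih =>
    simp only [List.foldl_cons]
    by_cases hc : d.contains v = true
    · rw [if_pos hc, ih d]
      cases h : d.get? x with
      | some w => simp
      | none =>
        have hxv : x ≠ v := fun he => by
          subst he; rw [PySem.Dict.contains_eq_isSome_get?, h] at hc; simp at hc
        simp [hxv]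
    · rw [if_neg hc, ih (d.insert v k), PySem.Dict.get?_insert]
      by_cases hxv : x = v
      · subst hxv
        have h : d.get? x = none := by
          rw [PySem.Dict.contains_eq_isSome_get?] at hc
          cases h : d.get? x
          · rfl
          · rw [h] at hc; simp at hc
        simp [h]
      · rw [if_neg hxv]
        cases h : d.get? x with
        | some w => simp
        | none => simp [hxv]

-- lookup in the whole index = A's first-match scan
theorem pv_index_get? (items : List (String × List String)) (x : String) :
    (pvBuildIndex items).get? x = pvFindKeyA x items := by
  unfold pvBuildIndex
  suffices h : ∀ d : PySem.Dict String String,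
      (items.foldl (fun d kv => kv.2.foldl (fun d v => if d.contains v then d else d.insert v kv.1) d) d).get? x =
        match d.get? x with
        | some w => some w
        | none => pvFindKeyA x items by
    rw [h PySem.Dict.empty]; simp [PySem.Dict.get?_empty]
  induction items with
  | nil => intro d; cases h : d.get? x <;> simp [pvFindKeyA, h]
  | cons kv rest ih =>
    intro d
    simp only [List.foldl_cons]
    rw [ih]
    rw [pv_inner_get? kv.2 d kv.1 x]
    cases h : d.get? x with
    | some w => simp
    | none =>
      simp only [pvFindKeyA]
      by_cases hx : x ∈ kv.2 <;> simp [hx]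

-- the accumulator loop of A is filterMap of the first-match scan
theorem pv_foldl_filterMap (f : String → Option String) (vids : List String) (acc : List String) :
    (vids.foldl (fun acc v => match f v with | some k => acc ++ [k] | none => acc) acc) =
      acc ++ vids.filterMap f := by
  induction vids generalizing acc with
  | nil => simp
  | cons v vs ih =>
    simp only [List.foldl_cons, List.filterMap_cons]
    cases f v <;> simp [ih]

-- ===== VERDICT (by name: the statement is the Claim_ definition above) =====
theorem updatedSeriesIdList_spec : Claim_equal_updatedSeriesIdList := by
  intro videoIds dict _
  unfold Spec_updatedSeriesIdList updatedSeriesIdList updatedSeriesIdList_alt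
  rw [pv_foldl_filterMap (fun v => pvFindKeyA v dict) videoIds []]
  simp only [List.nil_append]
  congr 1
  apply List.filterMap_congr
  intro v _
  rw [pv_index_get?]
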